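-- pv_equiv track=rewrite | github.com/MidnightJava/adventOfCode | AocPython/src/myAoc/2024/Day07.py | concat_options
-- ===== SOURCE A (Python) =====
-- def concat_options(eq):
--   n = len(eq)
--   if n == 1: return [eq]
--   res = []
--   for i in range(2**(n-1)):
--     _eq = eq[::]
--     bits = bin(i)[2:].zfill(n-1)
--     s = _eq.pop(0)
--     for b in list(bits):
--       if b == '1': s += " "
--       s+= _eq.pop(0)
--     res.append(s.split())
--   return res
-- ===== SOURCE B (Python) =====
-- def concat_options(eq):
--   if len(eq) == 1:
--     return [eq]
--   results = [eq[0]]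
--   for t in eq[1:]:
--     results = [s2 for s in results for s2 in (s + t, s + " " + t)]
--   return [s.split() for s in results]
-- ===== Notes on version B (the rewrite author's own statement) =====
-- stated objective: alternative
-- what changed: B replaces A's per-index reconstruction (binary string of each i in range(2**(n-1)), zfill, popping tokens) with incremental doubling of a prefix-sharing accumulator: each new token maps every accumulated string to its merged and separated extensions, in the same binary-counting order.
import Mathlib
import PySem

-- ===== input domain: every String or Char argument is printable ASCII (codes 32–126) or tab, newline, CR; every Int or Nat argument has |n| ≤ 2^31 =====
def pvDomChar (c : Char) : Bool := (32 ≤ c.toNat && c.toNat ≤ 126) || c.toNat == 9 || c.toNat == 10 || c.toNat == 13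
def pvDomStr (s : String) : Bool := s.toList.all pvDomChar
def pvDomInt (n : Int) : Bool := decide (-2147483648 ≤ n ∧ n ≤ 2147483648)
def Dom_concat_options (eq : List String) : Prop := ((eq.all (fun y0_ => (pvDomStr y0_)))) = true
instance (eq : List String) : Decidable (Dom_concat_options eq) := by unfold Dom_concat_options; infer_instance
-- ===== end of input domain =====

-- B builds the strings by prefix-sharing doubling instead of A's per-index reconstruction from bin(i); alternative decomposition, same order of results.

-- ===== PORT A =====
-- bin(i)[2:] as a list of chars, MSB first (exact for i ≥ 1; binDigits 0 = [])
def binDigits (n : Nat) : List Char :=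
  if h : n = 0 then []
  else binDigits (n / 2) ++ [if n % 2 = 1 then '1' else '0']
decreasing_by exact Nat.div_lt_self (Nat.pos_of_ne_zero h) (by norm_num)

-- bin(i)[2:].zfill(w)  (bin(0)[2:] = "0")
def pyBinZfill (i w : Nat) : List Char :=
  let d := if i = 0 then ['0'] else binDigits i
  List.replicate (w - d.length) '0' ++ d

-- A's inner loop: for b in bits: if b == '1': s += " "; s += _eq.pop(0)
-- (the [] token branch is unreachable in A: bits has exactly as many chars as remaining tokens)
def innerA : List Char → String → List String → String × List String
  | [], s, toks => (s, toks)
  | b :: bs, s, t :: rest => innerA bs ((if b = '1' then s ++ " " else s) ++ t) rest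
  | b :: _, s, [] => ((if b = '1' then s ++ " " else s), [])

def concat_options (eq : List String) : List (List String) :=
  let n := eq.length
  if n = 1 then [eq]
  else
    match eq with
    | [] => []   -- unreachable under Pre_: Python raises TypeError here (range(2**-1))
    | s0 :: rest =>
      (PySem.List.pyRange 0 ((2:Int)^(n-1)) 1).foldl
        (fun res i =>
          let bits := pyBinZfill i.toNat (n-1)
          let s := (innerA bits s0 rest).1
          res ++ [PySem.Str.split₀ s]) []

-- ===== PORT B =====
def concat_options_alt (eq : List String) : List (List String) :=
  if eq.length = 1 then [eq]
  else
    match eq with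
    | [] => []   -- unreachable under Pre_: Python B raises IndexError on eq[0]
    | s0 :: rest =>
      (rest.foldl (fun acc t => acc.flatMap (fun s => [s ++ t, s ++ " " ++ t])) [s0]).map
        PySem.Str.split₀

-- ===== PRECONDITION & SPEC =====
-- Pre_ excludes only the empty list, on which the Python A raises TypeError (range(2**-1)).
def Pre_concat_options (eq : List String) : Prop := eq ≠ []
instance (eq : List String) : Decidable (Pre_concat_options eq) := by unfold Pre_concat_options; infer_instance
def pvWitness_concat_options : List String := ["190", "10", "19"]
def Spec_concat_options (eq : List String) (out : List (List String)) : Prop := out = concat_options_alt eq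
instance (eq : List String) (out : List (List String)) : Decidable (Spec_concat_options eq out) := by unfold Spec_concat_options; infer_instance

-- ===== CLAIM (what is proved, stated in full; the proofs are below) =====
def Claim_equal_concat_options : Prop := ∀ (eq : List String), Dom_concat_options eq → Pre_concat_options eq → Spec_concat_options eq (concat_options eq)

-- ===== LEMMAS AND PROOFS =====

theorem sapp_assoc (a b c : String) : (a ++ b) ++ c = a ++ (b ++ c) :=
  String.append_assoc

theorem range_two_mul_flatMap {α : Type} (f : Nat → α) :
    ∀ m : Nat, (List.range (2 * m)).map f
      = (List.range m).flatMap (fun q => [f (2 * q), f (2 * q + 1)]) := by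
  intro m
  induction m with
  | zero => simp
  | succ m ih =>
    rw [show 2 * (m + 1) = (2 * m + 1) + 1 by ring, List.range_succ, List.range_succ,
      List.range_succ]
    simp [ih]

theorem binDigits_two_mul_add (q r : Nat) (hq : q ≠ 0) (hr : r < 2) :
    binDigits (2 * q + r) = binDigits q ++ [if r = 1 then '1' else '0'] := by
  rw [binDigits]
  have h1 : ¬ (2 * q + r = 0) := by omega
  have h2 : (2 * q + r) / 2 = q := by omega
  have h3 : (2 * q + r) % 2 = r := by omega
  simp [h2, h3, hq]

theorem binDigits_length_le : ∀ (q k : Nat), q < 2 ^ k → (binDigits q).length ≤ k := by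
  intro q
  induction q using Nat.strong_induction_on with
  | _ q ih =>
    intro k hk
    rw [binDigits]
    by_cases h0 : q = 0
    · simp [h0]
    · have hq2 : q / 2 < q := Nat.div_lt_self (Nat.pos_of_ne_zero h0) (by norm_num)
      have hk1 : 1 ≤ k := by
        by_contra h
        have : k = 0 := by omega
        subst this; simp at hk; omega
      have : q / 2 < 2 ^ (k - 1) := by
        have := Nat.pow_pos (n := k) (by norm_num : 0 < 2)
        have hkk : 2 ^ k = 2 * 2 ^ (k - 1) := by
          rw [← pow_succ']
          congr 1
          omega
        omega
      have := ih (q / 2) hq2 (k - 1) this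
      simp [h0]
      omega

theorem pyBinZfill_length (q k : Nat) (hq : q < 2 ^ k) (hk : 1 ≤ k) :
    (pyBinZfill q k).length = k := by
  unfold pyBinZfill
  by_cases h0 : q = 0
  · simp [h0]; omega
  · have := binDigits_length_le q k hq
    simp [h0]
    omega

theorem pyBinZfill_step (q k r : Nat) (hq : q < 2 ^ k) (hk : 1 ≤ k) (hr : r < 2) :
    pyBinZfill (2 * q + r) (k + 1) = pyBinZfill q k ++ [if r = 1 then '1' else '0'] := by
  unfold pyBinZfill
  by_cases h0 : q = 0
  · subst h0
    have hk' : k - 1 + 1 = k := Nat.sub_add_cancel hk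
    interval_cases r
    · simp
      rw [← hk', List.replicate_succ']
      simp
    · have hb1 : binDigits 1 = ['1'] := by rw [binDigits]; rw [binDigits]; simp
      simp [hb1]
      rw [← hk', List.replicate_succ']
      simp
  · have hne : ¬ (2 * q + r = 0) := by omega
    have hL := binDigits_length_le q k hq
    rw [binDigits_two_mul_add q r h0 hr]
    simp [h0]

theorem innerA_snoc : ∀ (bits : List Char) (ts : List String) (s : String) (b : Char) (t : String),
    bits.length = ts.length →
    innerA (bits ++ [b]) s (ts ++ [t])
      = ((innerA bits s ts).1 ++ (if b = '1' then " " ++ t else t), []) := by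
  intro bits
  induction bits with
  | nil =>
    intro ts s b t h
    have : ts = [] := List.eq_nil_of_length_eq_zero h.symm
    subst this
    simp only [List.nil_append, innerA]
    split_ifs with hb
    · simp [sapp_assoc]
    · rfl
  | cons b0 bs ih =>
    intro ts s b t h
    cases ts with
    | nil => simp at h
    | cons t0 tr =>
      simp only [List.cons_append, innerA]
      exact ih tr _ b t (by simpa using h)

theorem main_strings : ∀ (ts : List String) (s0 : String), ts ≠ [] →
    (List.range (2 ^ ts.length)).map
        (fun i => (innerA (pyBinZfill i ts.length) s0 ts).1)
      = ts.foldl (fun acc t => acc.flatMap (fun s => [s ++ t, s ++ " " ++ t])) [s0] := by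
  intro ts
  induction ts using List.reverseRecOn with
  | nil => intro s0 h; exact absurd rfl h
  | append_singleton xs t ih =>
    intro s0 _
    by_cases hxs : xs = []
    · subst hxs
      have hb1 : binDigits 1 = ['1'] := by rw [binDigits]; rw [binDigits]; simp
      simp [List.range_succ, pyBinZfill, hb1, innerA, sapp_assoc]
    · have hk : 1 ≤ xs.length := by
        cases xs with
        | nil => exact absurd rfl hxs
        | cons a l => simp
      have hlen : (xs ++ [t]).length = xs.length + 1 := by simp
      rw [hlen, pow_succ, Nat.mul_comm, range_two_mul_flatMap, List.foldl_append,
        ← ih s0 hxs]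
      simp only [List.foldl, List.flatMap_map]
      refine List.flatMap_congr (fun q hqm => ?_)
      have hq : q < 2 ^ xs.length := List.mem_range.mp hqm
      have hblen : (pyBinZfill q xs.length).length = xs.length :=
        pyBinZfill_length q xs.length hq hk
      have e0 : pyBinZfill (2 * q) (xs.length + 1)
          = pyBinZfill q xs.length ++ ['0'] := by
        have := pyBinZfill_step q xs.length 0 hq hk (by norm_num)
        simpa using this
      have e1 : pyBinZfill (2 * q + 1) (xs.length + 1)
          = pyBinZfill q xs.length ++ ['1'] := by
        have := pyBinZfill_step q xs.length 1 hq hk (by norm_num)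
        simpa using this
      rw [show 2 * q = 2 * q + 0 by ring] at e0
      rw [show (2:Nat) * q = 2 * q + 0 by ring, e0, e1,
        innerA_snoc _ _ _ _ _ hblen, innerA_snoc _ _ _ _ _ hblen]
      simp [← sapp_assoc]

-- ===== VERDICT (by name: the statement is the Claim_ definition above) =====
theorem concat_options_spec : Claim_equal_concat_options := by
  unfold Claim_equal_concat_options
  intro eq _ hpre
  unfold Spec_concat_options
  match eq with
  | [] => exact absurd rfl hpre
  | [x] => rfl
  | s0 :: t1 :: rest =>
    simp only [concat_options, concat_options_alt, List.length_cons]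
    have hne : ¬ (rest.length + 1 + 1 = 1) := by omega
    simp only [if_neg hne]
    have hcast : ((2:Int) ^ (rest.length + 1 + 1 - 1))
        = ((2 ^ (rest.length + 1) : Nat) : Int) := by
      push_cast
      norm_num
    rw [hcast, PySem.List.pyRange_zero_natCast, List.foldl_map,
      PySem.List.foldl_append_singleton_eq_map]
    simp only [Int.toNat_natCast, List.nil_append,
      show rest.length + 1 + 1 - 1 = rest.length + 1 from rfl]
    rw [show rest.length + 1 = (t1 :: rest).length from rfl]
    rw [show (fun k => PySem.Str.split₀ (innerA (pyBinZfill k (t1 :: rest).length) s0 (t1 :: rest)).1)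
        = PySem.Str.split₀ ∘ (fun k => (innerA (pyBinZfill k (t1 :: rest).length) s0 (t1 :: rest)).1)
        from rfl]
    rw [← List.map_map, main_strings (t1 :: rest) s0 (by simp)]
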